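-- pv_equiv track=rewrite | github.com/frost0807/coding-test-study | 유채우/과일 장수.py | solution
-- ===== SOURCE A (Python) =====
-- def solution(k, m, score):
--     answer = 0
--     score.sort(reverse=True)
--     # list comprehension 사용하여 동일한 크기로 리스트 분할
--     divide_list = [score[i:i+m] for i in range(0, len(score), m)]
--     for i in range(len(divide_list)):
--         if len(divide_list[i]) >= m:
--             answer += min(divide_list[i])*m
--     return answer
-- ===== SOURCE B (Python) =====
-- def solution(k, m, score):
--     # Same in-place descending sort as the original; then a single strided pass:
--     # in a descending-sorted list the minimum of each full group of m is its last
--     # element, so no sublists are built and min() is never called.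
--     score.sort(reverse=True)
--     answer = 0
--     for i in range(m - 1, len(score), m):
--         answer += score[i] * m
--     return answer
-- ===== Notes on version B (the rewrite author's own statement) =====
-- stated objective: simpler
-- what changed: Instead of building a list of m-sized sublists and calling min() on each full group, B does one strided index pass (range(m-1, len, m)) over the descending-sorted list, adding score[i]*m, since the last element of each full group is its minimum.
import Mathlib
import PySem

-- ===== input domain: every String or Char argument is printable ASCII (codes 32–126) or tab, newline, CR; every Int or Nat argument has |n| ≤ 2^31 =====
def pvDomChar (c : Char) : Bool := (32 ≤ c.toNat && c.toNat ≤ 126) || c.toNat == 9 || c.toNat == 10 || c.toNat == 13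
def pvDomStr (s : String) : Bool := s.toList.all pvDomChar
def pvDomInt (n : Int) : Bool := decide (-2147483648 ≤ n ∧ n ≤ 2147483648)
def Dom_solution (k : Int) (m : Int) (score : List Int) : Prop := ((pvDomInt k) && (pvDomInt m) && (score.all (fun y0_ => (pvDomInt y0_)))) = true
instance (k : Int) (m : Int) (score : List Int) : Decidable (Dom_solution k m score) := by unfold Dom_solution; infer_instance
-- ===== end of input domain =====

-- B replaces A's list-of-m-sized-sublists + per-group min() with one strided index pass over
-- the same descending-sorted list (objective: simpler). Both A and B sort `score` in place in
-- Python; the equivalence proved here is about the return value.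

-- ===== PORT A =====
def solution (k : Int) (m : Int) (score : List Int) : Int :=
  let s := PySem.List.sorted score (fun x => x) true
  let divide_list := (PySem.List.pyRange 0 (s.length : Int) m).map
    (fun i => PySem.List.slice s (some i) (some (i + m)))
  -- min() on an empty list raises in Python; under Pre_ (m ≠ 0) the guard len ≥ m makes the
  -- chunk nonempty whenever min is evaluated, so the .getD 0 default is unreachable
  (PySem.List.pyRange 0 (divide_list.length : Int) 1).foldl
    (fun answer i =>
      let c := PySem.List.pyGetD divide_list i []
      if m ≤ (c.length : Int) then answer + ((PySem.List.min? c (fun x => x)).getD 0) * m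
      else answer) 0

-- ===== PORT B =====
def solution_alt (k : Int) (m : Int) (score : List Int) : Int :=
  let s := PySem.List.sorted score (fun x => x) true
  -- every index produced by range(m-1, len(s), m) is in range, so score[i] never raises and
  -- the pyGetD default is unreachable
  (PySem.List.pyRange (m - 1) (s.length : Int) m).foldl
    (fun answer i => answer + PySem.List.pyGetD s i 0 * m) 0

-- ===== PRECONDITION & SPEC =====
-- Pre_ excludes only m = 0, where Python's range(..., step=0) raises ValueError in both A and B.
def Pre_solution (k : Int) (m : Int) (score : List Int) : Prop := m ≠ 0
instance (k : Int) (m : Int) (score : List Int) : Decidable (Pre_solution k m score) := by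
  unfold Pre_solution; infer_instance

def pvWitness_solution : Int × Int × List Int := (4, 3, ([1, 2, 3, 1, 2, 3, 1] : List Int))

def Spec_solution (k : Int) (m : Int) (score : List Int) (out : Int) : Prop := out = solution_alt k m score
instance (k : Int) (m : Int) (score : List Int) (out : Int) : Decidable (Spec_solution k m score out) := by unfold Spec_solution; infer_instance

-- ===== CLAIM (what is proved, stated in full; the proofs are below) =====
def Claim_equal_solution : Prop := ∀ (k : Int) (m : Int) (score : List Int), Dom_solution k m score → Pre_solution k m score → Spec_solution k m score (solution k m score)

-- ===== LEMMAS AND PROOFS =====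

-- range(a, b, step) is empty for a negative step when a ≤ b
theorem pyRange_neg_nil (a b s : Int) (hs : s < 0) (hab : a ≤ b) :
    PySem.List.pyRange a b s = [] := by
  unfold PySem.List.pyRange
  rw [if_neg (by omega)]
  simp only
  rw [if_neg (by omega), if_neg (by omega)]
  simp

-- range(a, b, m) is empty for a positive step when b ≤ a
theorem pyRange_pos_nil (a b m : Int) (hm : 0 < m) (hab : b ≤ a) :
    PySem.List.pyRange a b m = [] := by
  rw [PySem.List.pyRange_of_pos a b hm, if_neg (by omega)]
  simp

-- induction form of range(a, b, m) for a positive step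
theorem pyRange_pos_cons (a b m : Int) (hm : 0 < m) (hab : a < b) :
    PySem.List.pyRange a b m = a :: PySem.List.pyRange (a + m) b m := by
  rw [PySem.List.pyRange_of_pos a b hm, PySem.List.pyRange_of_pos (a + m) b hm, if_pos hab]
  have key : ((b - a + m - 1) / m).toNat
      = (if a + m < b then ((b - (a + m) + m - 1) / m).toNat else 0) + 1 := by
    split_ifs with h2
    · have hd : (b - a + m - 1) / m = (b - (a + m) + m - 1) / m + 1 := by
        have he : b - a + m - 1 = (b - (a + m) + m - 1) + 1 * m := by ring
        rw [he, Int.add_mul_ediv_right _ _ (by omega)]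
      have hnn : 0 ≤ (b - (a + m) + m - 1) / m := Int.ediv_nonneg (by omega) (by omega)
      omega
    · have hd : (b - a + m - 1) / m = 1 := by
        rw [← PySem.Int.floordiv_eq_ediv_of_pos hm,
          PySem.Int.floordiv_eq_iff_of_pos hm]
        omega
      omega
  rw [key, List.range_succ_eq_map]
  simp only [List.map_cons, List.map_map, Nat.cast_zero, mul_zero, add_zero]
  congr 1
  apply List.map_congr_left
  intro x _
  simp only [Function.comp_apply, Nat.succ_eq_add_one]
  push_cast
  ring

-- the chunk-sum A computes, one full group of m at a time
def chunkA (m : Int) (t : List Int) : Int :=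
  if h : 0 < m ∧ m ≤ (t.length : Int) then
    ((PySem.List.min? (t.take m.toNat) (fun x => x)).getD 0) * m + chunkA m (t.drop m.toNat)
  else 0
termination_by t.length
decreasing_by simp; omega

-- the chunk-sum B computes: last element of each full group of m, times m
def chunkB (m : Int) (t : List Int) : Int :=
  if h : 0 < m ∧ m ≤ (t.length : Int) then
    t.getD (m - 1).toNat 0 * m + chunkB m (t.drop m.toNat)
  else 0
termination_by t.length
decreasing_by simp; omega

theorem chunkA_eq (m : Int) (t : List Int) :
    chunkA m t = if 0 < m ∧ m ≤ (t.length : Int) then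
      ((PySem.List.min? (t.take m.toNat) (fun x => x)).getD 0) * m + chunkA m (t.drop m.toNat)
    else 0 := by
  rw [chunkA]; split_ifs with h <;> simp

theorem chunkB_eq (m : Int) (t : List Int) :
    chunkB m t = if 0 < m ∧ m ≤ (t.length : Int) then
      t.getD (m - 1).toNat 0 * m + chunkB m (t.drop m.toNat)
    else 0 := by
  rw [chunkB]; split_ifs with h <;> simp

-- A's fold over range(0, len, m), generalized over the start offset
theorem lemA (m : Int) (hm : 0 < m) (s : List Int) :
    ∀ (N : Nat) (a : Int) (acc : Int), 0 ≤ a → ((s.length : Int) - a).toNat ≤ N →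
    (PySem.List.pyRange a (s.length : Int) m).foldl
      (fun answer i =>
        if m ≤ (((PySem.List.slice s (some i) (some (i + m))).length : Nat) : Int) then
          answer + ((PySem.List.min? (PySem.List.slice s (some i) (some (i + m))) (fun x => x)).getD 0) * m
        else answer) acc
    = acc + chunkA m (s.drop a.toNat) := by
  intro N
  induction N with
  | zero =>
    intro a acc ha hN
    have hge : (s.length : Int) ≤ a := by omega
    have hnil : s.drop a.toNat = [] := List.drop_eq_nil_of_le (by omega)
    have hc : ¬ (0 < m ∧ m ≤ ((([] : List Int).length : Nat) : Int)) := by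
      simp
    rw [pyRange_pos_nil _ _ _ hm hge, List.foldl_nil, hnil, chunkA_eq, if_neg hc]
    ring
  | succ n ih =>
    intro a acc ha hN
    by_cases hlt : a < (s.length : Int)
    · rw [pyRange_pos_cons _ _ _ hm hlt]
      simp only [List.foldl_cons]
      have hsl : PySem.List.slice s (some a) (some (a + m)) = (s.drop a.toNat).take m.toNat := by
        rw [PySem.List.slice_toNat s ha (by omega)]
        congr 1
        omega
      rw [hsl]
      by_cases hfull : a + m ≤ (s.length : Int)
      · have hcond : m ≤ ((((s.drop a.toNat).take m.toNat).length : Nat) : Int) := by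
          simp
          omega
        have hcA : 0 < m ∧ m ≤ (((s.drop a.toNat).length : Nat) : Int) := by
          constructor
          · exact hm
          · simp
            omega
        have hdd : s.drop (a + m).toNat = (s.drop a.toNat).drop m.toNat := by
          rw [List.drop_drop]
          congr 1
          omega
        rw [if_pos hcond, ih (a + m) _ (by omega) (by omega), hdd,
          chunkA_eq m (s.drop a.toNat), if_pos hcA]
        ring
      · have hcond : ¬ m ≤ ((((s.drop a.toNat).take m.toNat).length : Nat) : Int) := by
          simp
          omega
        have hcA : ¬ (0 < m ∧ m ≤ (((s.drop a.toNat).length : Nat) : Int)) := by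
          simp
          omega
        rw [if_neg hcond, pyRange_pos_nil _ _ _ hm (by omega), List.foldl_nil,
          chunkA_eq, if_neg hcA]
        ring
    · have hnil : s.drop a.toNat = [] := List.drop_eq_nil_of_le (by omega)
      have hc : ¬ (0 < m ∧ m ≤ ((([] : List Int).length : Nat) : Int)) := by
        simp
      rw [pyRange_pos_nil _ _ _ hm (by omega), List.foldl_nil, hnil, chunkA_eq, if_neg hc]
      ring

-- B's fold over range(m-1, len, m), generalized over the start offset
theorem lemB (m : Int) (hm : 0 < m) (s : List Int) :
    ∀ (N : Nat) (a : Int) (acc : Int), 0 ≤ a → ((s.length : Int) - a).toNat ≤ N →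
    (PySem.List.pyRange (a + m - 1) (s.length : Int) m).foldl
      (fun answer i => answer + PySem.List.pyGetD s i 0 * m) acc
    = acc + chunkB m (s.drop a.toNat) := by
  intro N
  induction N with
  | zero =>
    intro a acc ha hN
    have hnil : s.drop a.toNat = [] := List.drop_eq_nil_of_le (by omega)
    have hc : ¬ (0 < m ∧ m ≤ ((([] : List Int).length : Nat) : Int)) := by
      simp
    rw [pyRange_pos_nil _ _ _ hm (by omega), List.foldl_nil, hnil, chunkB_eq, if_neg hc]
    ring
  | succ n ih =>
    intro a acc ha hN
    by_cases hfull : a + m ≤ (s.length : Int)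
    · rw [pyRange_pos_cons _ _ _ hm (by omega)]
      simp only [List.foldl_cons]
      have hidx : PySem.List.pyGetD s (a + m - 1) 0 = (s.drop a.toNat).getD (m - 1).toNat 0 := by
        rw [PySem.List.pyGetD_of_nonneg s 0 (by omega), List.getD_eq_getElem?_getD,
          List.getD_eq_getElem?_getD, List.getElem?_drop]
        have hnn : (a + m - 1).toNat = a.toNat + (m - 1).toNat := by omega
        rw [hnn]
      have hstep : a + m - 1 + m = (a + m) + m - 1 := by ring
      have hdd : s.drop (a + m).toNat = (s.drop a.toNat).drop m.toNat := by
        rw [List.drop_drop]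
        congr 1
        omega
      have hcB : 0 < m ∧ m ≤ (((s.drop a.toNat).length : Nat) : Int) := by
        constructor
        · exact hm
        · simp
          omega
      rw [hidx, hstep, ih (a + m) _ (by omega) (by omega), hdd,
        chunkB_eq m (s.drop a.toNat), if_pos hcB]
      ring
    · have hcB : ¬ (0 < m ∧ m ≤ (((s.drop a.toNat).length : Nat) : Int)) := by
        simp
        omega
      rw [pyRange_pos_nil _ _ _ hm (by omega), List.foldl_nil, chunkB_eq, if_neg hcB]
      ring

-- on a descending-sorted list the min of the first m elements is the m-th element
theorem min_take (m : Int) (hm : 0 < m) (t : List Int) (hlen : m ≤ (t.length : Int))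
    (hp : t.Pairwise (fun a b => b ≤ a)) :
    (PySem.List.min? (t.take m.toNat) (fun x => x)).getD 0 = t.getD (m - 1).toNat 0 := by
  have hidx : (m - 1).toNat < t.length := by omega
  obtain ⟨v, hv⟩ : ∃ v, PySem.List.min? (t.take m.toNat) (fun x => x) = some v := by
    cases h : PySem.List.min? (t.take m.toNat) (fun x => x) with
    | none =>
      exfalso
      have h0 : t.take m.toNat = [] := (PySem.List.min?_eq_none_iff _ _).mp h
      have h1 : (t.take m.toNat).length = 0 := by rw [h0]; rfl
      rw [List.length_take] at h1
      omega
    | some v => exact ⟨v, rfl⟩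
  rw [hv, Option.getD_some, List.getD_eq_getElem t 0 hidx]
  have hmem := PySem.List.min?_mem hv
  have hmin := PySem.List.min?_isMin hv
  have hm1 : (m - 1).toNat < (t.take m.toNat).length := by
    simp
    omega
  have hlast : (t.take m.toNat)[(m - 1).toNat]'hm1 = t[(m - 1).toNat]'hidx :=
    List.getElem_take
  have h1 : v ≤ t[(m - 1).toNat]'hidx := by
    refine hmin _ ?_
    rw [← hlast]
    exact List.getElem_mem hm1
  have h2 : t[(m - 1).toNat]'hidx ≤ v := by
    obtain ⟨j, hj, hjv⟩ := List.getElem_of_mem hmem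
    have hjlt : j < m.toNat := by
      have hj' := hj
      simp at hj'
      omega
    have hjt : t[j]'(by omega) = v := by
      rw [← hjv]
      exact List.getElem_take.symm
    rcases Nat.lt_or_ge j (m - 1).toNat with hlt | hge
    · have hpw := List.pairwise_iff_getElem.mp hp j (m - 1).toNat (by omega) hidx hlt
      omega
    · have hje : j = (m - 1).toNat := by omega
      subst hje
      omega
  omega

theorem chunk_eq (m : Int) (hm : 0 < m) :
    ∀ (N : Nat) (t : List Int), t.length ≤ N → t.Pairwise (fun a b => b ≤ a) →
    chunkA m t = chunkB m t := by
  intro N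
  induction N with
  | zero =>
    intro t ht _
    have hc : ¬ (0 < m ∧ m ≤ ((t.length : Nat) : Int)) := by omega
    rw [chunkA_eq, chunkB_eq, if_neg hc, if_neg hc]
  | succ n ih =>
    intro t ht hp
    rw [chunkA_eq, chunkB_eq]
    split_ifs with h
    · rw [min_take m hm t h.2 hp,
        ih (t.drop m.toNat) (by simp; omega) (hp.sublist (List.drop_sublist _ _))]
    · rfl

-- ===== VERDICT (by name: the statement is the Claim_ definition above) =====
theorem solution_spec : Claim_equal_solution := by
  intro k m score _hdom hpre
  unfold Pre_solution at hpre
  unfold Spec_solution solution solution_alt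
  simp only []
  set s := PySem.List.sorted score (fun x => x) true with hs
  set divide_list := (PySem.List.pyRange 0 (s.length : Int) m).map
    (fun i => PySem.List.slice s (some i) (some (i + m))) with hdl
  rcases lt_or_gt_of_ne hpre with hneg | hpos
  · -- m < 0: both ranges are empty
    have hA : PySem.List.pyRange 0 (s.length : Int) m = [] :=
      pyRange_neg_nil _ _ _ hneg (by positivity)
    have hB : PySem.List.pyRange (m - 1) (s.length : Int) m = [] :=
      pyRange_neg_nil _ _ _ hneg (by omega)
    rw [hdl, hA, hB]
    simp only [List.map_nil, List.length_nil, Nat.cast_zero, List.foldl_nil]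
    rw [pyRange_pos_nil 0 0 1 (by norm_num) (le_refl 0), List.foldl_nil]
  · -- m > 0
    have hApre :
        (PySem.List.pyRange 0 ((divide_list.length : Nat) : Int)).foldl
          (fun answer i =>
            let c := PySem.List.pyGetD divide_list i []
            if m ≤ ((c.length : Nat) : Int) then
              answer + ((PySem.List.min? c (fun x => x)).getD 0) * m
            else answer) 0
        = divide_list.foldl
          (fun answer c =>
            if m ≤ ((c.length : Nat) : Int) then
              answer + ((PySem.List.min? c (fun x => x)).getD 0) * m
            else answer) 0 :=
      PySem.List.foldl_pyRange_zero_pyGetD' divide_list []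
        (fun answer c =>
          if m ≤ ((c.length : Nat) : Int) then
            answer + ((PySem.List.min? c (fun x => x)).getD 0) * m
          else answer) 0
    rw [hApre, hdl, List.foldl_map]
    have hA := lemA m hpos s s.length 0 0 (le_refl 0) (by omega)
    have hB := lemB m hpos s s.length 0 0 (le_refl 0) (by omega)
    simp only [Int.toNat_zero, List.drop_zero, zero_add] at hA hB
    rw [hA, hB, chunk_eq m hpos s.length s (le_refl _)
      (PySem.List.sorted_pairwise_rev score (fun x => x))]
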